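-- pv_equiv track=rewrite | github.com/CreateRandom/transformer-abstractive-summarization | harvard_format.py | extract_story_and_highlights
-- ===== SOURCE A (Python) =====
-- def extract_story_and_highlights(lines):
--
--     story = None
--     highlights = None
--
--     # find first highlight (if any)
--     try:
--         highlight_start = lines.index('@highlight\n')
--     except ValueError:
--         highlight_start = len(lines)
--
--     story_lines = lines[:highlight_start]
--     story_lines = [x for x in story_lines if x != '\n']
--     # TODO think about xa0 character
--     story = ''.join(story_lines)
--
--     highlight_lines = lines[highlight_start:]
--     highlight_lines = [x for x in highlight_lines if x != '\n' and x != '@highlight\n']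
--
--     return story, highlight_lines
-- ===== SOURCE B (Python) =====
-- def extract_story_and_highlights(lines):
--     story_parts = []
--     highlight_lines = []
--     in_highlights = False
--     for x in lines:
--         if in_highlights:
--             if x != '\n' and x != '@highlight\n':
--                 highlight_lines.append(x)
--         else:
--             if x == '@highlight\n':
--                 in_highlights = True
--             elif x != '\n':
--                 story_parts.append(x)
--     return ''.join(story_parts), highlight_lines
-- ===== Notes on version B (the rewrite author's own statement) =====
-- stated objective: alternative
-- what changed: Replaces the index lookup plus two slices plus two filtering comprehensions with a single pass over the lines maintaining an in_highlights flag that switches routing at the first '@highlight\n' marker.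
import Mathlib
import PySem

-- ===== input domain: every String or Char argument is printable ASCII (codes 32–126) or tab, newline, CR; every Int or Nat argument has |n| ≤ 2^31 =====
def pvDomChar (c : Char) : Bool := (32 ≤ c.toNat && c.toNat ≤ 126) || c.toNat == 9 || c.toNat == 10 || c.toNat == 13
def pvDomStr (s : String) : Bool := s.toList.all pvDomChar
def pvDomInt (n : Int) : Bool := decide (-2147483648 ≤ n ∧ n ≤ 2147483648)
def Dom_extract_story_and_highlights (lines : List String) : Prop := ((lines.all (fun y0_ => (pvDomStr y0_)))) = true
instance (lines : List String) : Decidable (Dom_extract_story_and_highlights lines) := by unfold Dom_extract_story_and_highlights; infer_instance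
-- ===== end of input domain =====

-- B replaces A's index-lookup + two slices + two comprehensions with one pass
-- over the lines maintaining an in_highlights flag (alternative decomposition).

-- ===== PORT A =====
def extract_story_and_highlights (lines : List String) : String × List String :=
  let highlight_start : Int :=
    match PySem.List.index? lines "@highlight\n" with
    | some i => (i : Int)
    | none => (lines.length : Int)
  let story_lines := PySem.List.slice lines none (some highlight_start)
  let story_lines := story_lines.filter (fun x => decide (x ≠ "\n"))
  let story := PySem.Str.join "" story_lines
  let highlight_lines := PySem.List.slice lines (some highlight_start) none
  let highlight_lines := highlight_lines.filter (fun x => decide (x ≠ "\n" ∧ x ≠ "@highlight\n"))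
  (story, highlight_lines)

-- ===== PORT B =====
-- one step of B's for-loop: state = (story_parts, highlight_lines, in_highlights)
def eshStep (acc : List String × List String × Bool) (x : String) :
    List String × List String × Bool :=
  let (story, hl, inHl) := acc
  if inHl then
    if x ≠ "\n" ∧ x ≠ "@highlight\n" then (story, hl ++ [x], inHl) else acc
  else
    if x = "@highlight\n" then (story, hl, true)
    else if x ≠ "\n" then (story ++ [x], hl, inHl) else acc

def extract_story_and_highlights_alt (lines : List String) : String × List String :=
  let st := lines.foldl eshStep ([], [], false)
  (PySem.Str.join "" st.1, st.2.1)

-- ===== PRECONDITION & SPEC =====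
def Spec_extract_story_and_highlights (lines : List String) (out : String × List String) : Prop := out = extract_story_and_highlights_alt lines
instance (lines : List String) (out : String × List String) : Decidable (Spec_extract_story_and_highlights lines out) := by unfold Spec_extract_story_and_highlights; infer_instance

-- ===== CLAIM (what is proved, stated in full; the proofs are below) =====
def Claim_equal_extract_story_and_highlights : Prop := ∀ (lines : List String), Dom_extract_story_and_highlights lines → Spec_extract_story_and_highlights lines (extract_story_and_highlights lines)

-- ===== LEMMAS AND PROOFS =====

theorem eshStep_true (l : List String) (story hl : List String) :
    l.foldl eshStep (story, hl, true)
      = (story, hl ++ l.filter (fun x => decide (x ≠ "\n" ∧ x ≠ "@highlight\n")), true) := by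
  induction l generalizing hl with
  | nil => simp
  | cons x t ih =>
    simp only [List.foldl_cons, List.filter_cons, eshStep]
    by_cases h : x ≠ "\n" ∧ x ≠ "@highlight\n" <;> simp [h, ih]

theorem eshStep_false (l : List String) (story hl : List String)
    (hmem : "@highlight\n" ∉ l) :
    l.foldl eshStep (story, hl, false)
      = (story ++ l.filter (fun x => decide (x ≠ "\n")), hl, false) := by
  induction l generalizing story with
  | nil => simp
  | cons x t ih =>
    simp only [List.mem_cons, not_or] at hmem
    simp only [List.foldl_cons, List.filter_cons, eshStep]
    have hx : x ≠ "@highlight\n" := fun h => hmem.1 h.symm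
    by_cases h : x ≠ "\n" <;> simp [hx, h, ih _ hmem.2]

theorem eshStep_marker (story hl : List String) :
    eshStep (story, hl, false) "@highlight\n" = (story, hl, true) := by
  simp [eshStep]

theorem extract_story_and_highlights_eq (lines : List String) :
    extract_story_and_highlights lines = extract_story_and_highlights_alt lines := by
  by_cases hmem : "@highlight\n" ∈ lines
  · obtain ⟨k, hk⟩ := (PySem.List.index?_isSome_iff lines "@highlight\n").2 hmem
      |> fun h => Option.isSome_iff_exists.mp h
    obtain ⟨pre, suf, hsplit, hlen, hpre⟩ :=
      (PySem.List.index?_eq_some_iff lines "@highlight\n" k).1 hk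
    subst hsplit
    simp only [extract_story_and_highlights, extract_story_and_highlights_alt, hk]
    rw [PySem.List.slice_to_natCast, PySem.List.slice_from_natCast]
    rw [List.foldl_append, eshStep_false pre [] [] hpre,
      List.foldl_cons, eshStep_marker, eshStep_true]
    subst hlen
    simp [List.take_left', List.drop_left']
  · have hnone : PySem.List.index? lines "@highlight\n" = none :=
      (PySem.List.index?_eq_none_iff lines "@highlight\n").2 hmem
    simp only [extract_story_and_highlights, extract_story_and_highlights_alt, hnone]
    rw [PySem.List.slice_to_natCast, PySem.List.slice_from_natCast]
    rw [eshStep_false lines [] [] hmem]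
    simp

-- ===== VERDICT (by name: the statement is the Claim_ definition above) =====
theorem extract_story_and_highlights_spec : Claim_equal_extract_story_and_highlights := by
  intro lines _
  unfold Spec_extract_story_and_highlights
  exact extract_story_and_highlights_eq lines
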